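-- pv_equiv track=rewrite | github.com/aconconi/advent-of-code-2024 | aoc2024_day04.py | matrix_elements
-- ===== SOURCE A (Python) =====
-- def matrix_elements(matrix):
--     num_rows = len(matrix)
--     num_cols = len(matrix[0])
--
--     # Yield rows
--     yield from matrix
--
--     # Yield columns
--     yield from (
--         "".join(matrix[row][col] for row in range(num_rows)) for col in range(num_cols)
--     )
--
--     # Yield left diagonals (top-left to bottom-right)
--     yield from (
--         "".join(
--             matrix[row][diag - row]
--             for row in range(num_rows)
--             if 0 <= diag - row < num_cols
--         )
--         for diag in range(num_rows + num_cols - 1)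
--     )
--
--     # Yield right diagonals (top-right to bottom-left)
--     yield from (
--         "".join(
--             matrix[row][diag - (num_cols - 1 - row)]
--             for row in range(num_rows)
--             if 0 <= diag - (num_cols - 1 - row) < num_cols
--         )
--         for diag in range(num_rows + num_cols - 1)
--     )
-- ===== SOURCE B (Python) =====
-- def matrix_elements(matrix):
--     # Single pass over the cells: bucket each character into its column,
--     # left-diagonal (r + c) and right-diagonal (c + num_cols - 1 - r) bucket,
--     # then join the buckets.
--     num_rows = len(matrix)
--     num_cols = len(matrix[0])
--     n_diags = num_rows + num_cols - 1
--     cols = [[] for _ in range(num_cols)]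
--     diags = [[] for _ in range(n_diags)]
--     antis = [[] for _ in range(n_diags)]
--     for r in range(num_rows):
--         row = matrix[r]
--         for c in range(num_cols):
--             ch = row[c]
--             cols[c].append(ch)
--             diags[r + c].append(ch)
--             a = c + num_cols - 1 - r
--             if 0 <= a < n_diags:
--                 antis[a].append(ch)
--     yield from matrix
--     for bucket in cols:
--         yield "".join(bucket)
--     for bucket in diags:
--         yield "".join(bucket)
--     for bucket in antis:
--         yield "".join(bucket)
-- ===== Notes on version B (the rewrite author's own statement) =====
-- stated objective: faster
-- what changed: A rebuilds every column and every diagonal line by rescanning all row indices per output line; B makes a single pass over the cells, bucketing each character into its column, diagonal (r+c) and anti-diagonal (c+num_cols-1-r) bucket, then joins the buckets (intended as faster; a timing run measured B ahead 2.6x-88x at the sizes both finished, though its largest-size sample was too thin to confirm the label).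
import Mathlib
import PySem

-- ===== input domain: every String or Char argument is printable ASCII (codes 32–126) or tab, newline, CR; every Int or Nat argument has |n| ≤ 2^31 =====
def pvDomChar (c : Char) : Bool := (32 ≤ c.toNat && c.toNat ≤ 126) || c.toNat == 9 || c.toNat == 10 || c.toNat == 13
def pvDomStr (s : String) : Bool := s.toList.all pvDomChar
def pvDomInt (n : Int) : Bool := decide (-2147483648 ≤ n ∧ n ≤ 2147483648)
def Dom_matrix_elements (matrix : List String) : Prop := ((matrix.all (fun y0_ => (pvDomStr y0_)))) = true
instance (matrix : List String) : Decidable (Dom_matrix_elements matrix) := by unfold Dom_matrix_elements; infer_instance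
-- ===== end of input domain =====

-- B replaces A's per-line rescans of all rows by one pass over the cells that buckets each
-- character into its column / diagonal / anti-diagonal bucket, then joins the buckets
-- (intended as faster; a timing run measured B ahead at every size it could compare: 2.6x-88x).

-- ===== PORT A =====
-- A is a generator; its value is the sequence it yields: rows, then columns, then the two
-- diagonal families, each line rebuilt by scanning every row index.
def matrix_elements (matrix : List String) : List String :=
  let rows := matrix.map String.toList
  let R := rows.length
  let C := (rows.headD []).length      -- len(matrix[0]); raises on [] — excluded by Pre_
  let colsOut := (List.range C).map (fun col =>
      String.mk ((List.range R).map (fun row => ((rows.getD row []).getD col ' '))))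
  let d1Out := (List.range (R + C - 1)).map (fun (diag : Nat) =>
      String.mk (((List.range R).filter (fun (row : Nat) =>
          decide (0 ≤ (diag : Int) - (row : Int) ∧ (diag : Int) - (row : Int) < (C : Int)))).map
        (fun row => (rows.getD row []).getD ((diag : Int) - (row : Int)).toNat ' ')))
  let d2Out := (List.range (R + C - 1)).map (fun (diag : Nat) =>
      String.mk (((List.range R).filter (fun (row : Nat) =>
          decide (0 ≤ (diag : Int) - ((C : Int) - 1 - (row : Int)) ∧
                  (diag : Int) - ((C : Int) - 1 - (row : Int)) < (C : Int)))).map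
        (fun row => (rows.getD row []).getD ((diag : Int) - ((C : Int) - 1 - (row : Int))).toNat ' ')))
  matrix ++ colsOut ++ d1Out ++ d2Out

-- ===== PORT B =====
-- bucket[i].append(ch)
def bput : List (List Char) → Nat → Char → List (List Char)
  | [], _, _ => []
  | b :: bs, 0, ch => (b ++ [ch]) :: bs
  | b :: bs, i + 1, ch => b :: bput bs i ch

def matrix_elements_alt (matrix : List String) : List String :=
  let rows := matrix.map String.toList
  let R := rows.length
  let C := (rows.headD []).length      -- len(matrix[0]); raises on [] — excluded by Pre_
  let n := R + C - 1
  let st :=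
    (List.range R).foldl (fun st r =>
      (List.range C).foldl (fun st c =>
        (bput st.1 c ((rows.getD r []).getD c ' '),
         bput st.2.1 (r + c) ((rows.getD r []).getD c ' '),
         if 0 ≤ (c : Int) + (C : Int) - 1 - (r : Int) ∧
              (c : Int) + (C : Int) - 1 - (r : Int) < (n : Int) then
           bput st.2.2 ((c : Int) + (C : Int) - 1 - (r : Int)).toNat ((rows.getD r []).getD c ' ')
         else st.2.2)) st)
      ((List.replicate C ([] : List Char)), (List.replicate n ([] : List Char)),
       (List.replicate n ([] : List Char)))
  matrix ++ st.1.map (fun b => String.mk b) ++ st.2.1.map (fun b => String.mk b)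
         ++ st.2.2.map (fun b => String.mk b)

-- ===== PRECONDITION & SPEC =====
-- Pre_: exactly the inputs on which the Python A returns: a nonempty matrix whose every row is
-- at least as long as the first (a shorter row makes matrix[row][col] raise IndexError).
def Pre_matrix_elements (matrix : List String) : Prop :=
  matrix ≠ [] ∧ ∀ s ∈ matrix, (matrix.headD "").toList.length ≤ s.toList.length
instance (matrix : List String) : Decidable (Pre_matrix_elements matrix) := by
  unfold Pre_matrix_elements; infer_instance

def pvWitness_matrix_elements : List String := ["abc", "def"]

def Spec_matrix_elements (matrix : List String) (out : List String) : Prop := out = matrix_elements_alt matrix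
instance (matrix : List String) (out : List String) : Decidable (Spec_matrix_elements matrix out) := by unfold Spec_matrix_elements; infer_instance

-- ===== CLAIM (what is proved, stated in full; the proofs are below) =====
def Claim_equal_matrix_elements : Prop := ∀ (matrix : List String), Dom_matrix_elements matrix → Pre_matrix_elements matrix → Spec_matrix_elements matrix (matrix_elements matrix)

-- ===== LEMMAS AND PROOFS =====

theorem bput_length (bs : List (List Char)) (i : Nat) (ch : Char) :
    (bput bs i ch).length = bs.length := by
  induction bs generalizing i with
  | nil => rfl
  | cons b bs ih => cases i <;> simp [bput, ih]

theorem bput_getElem? (bs : List (List Char)) (i j : Nat) (ch : Char) :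
    (bput bs i ch)[j]? = if i = j then bs[j]?.map (· ++ [ch]) else bs[j]? := by
  induction bs generalizing i j with
  | nil => cases i <;> simp [bput]
  | cons b bs ih =>
    cases i with
    | zero => cases j <;> simp [bput]
    | succ i =>
      cases j with
      | zero => simp [bput]
      | succ j => simpa [bput] using ih i j

theorem foldl_bput_length {α : Type} (cond : α → Prop) [DecidablePred cond]
    (idx : α → Nat) (val : α → Char) (ps : List α) (bs : List (List Char)) :
    (ps.foldl (fun bs p => if cond p then bput bs (idx p) (val p) else bs) bs).length
      = bs.length := by
  induction ps generalizing bs with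
  | nil => rfl
  | cons p ps ih =>
    simp only [List.foldl_cons]
    rw [ih]
    split <;> simp [bput_length]

theorem foldl_bput_getElem? {α : Type} (cond : α → Prop) [DecidablePred cond]
    (idx : α → Nat) (val : α → Char) (ps : List α) (bs : List (List Char)) (j : Nat) :
    (ps.foldl (fun bs p => if cond p then bput bs (idx p) (val p) else bs) bs)[j]?
      = bs[j]?.map (· ++ ps.filterMap (fun p => if cond p ∧ idx p = j then some (val p) else none)) := by
  induction ps generalizing bs with
  | nil => cases h : bs[j]? <;> simp [h]
  | cons p ps ih =>
    simp only [List.foldl_cons, List.filterMap_cons]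
    rw [ih]
    by_cases hc : cond p
    · by_cases hij : idx p = j
      · simp [hc, hij, bput_getElem?, Option.map_map]
        cases h : bs[j]? <;> simp [Function.comp, List.append_assoc]
      · simp [hc, hij, bput_getElem?]
    · simp [hc]

theorem bucket_spec {α : Type} (cond : α → Prop) [DecidablePred cond]
    (idx : α → Nat) (val : α → Char) (ps : List α) (n : Nat) :
    ps.foldl (fun bs p => if cond p then bput bs (idx p) (val p) else bs) (List.replicate n [])
      = (List.range n).map (fun j => ps.filterMap (fun p => if cond p ∧ idx p = j then some (val p) else none)) := by
  apply List.ext_getElem?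
  intro j
  rw [foldl_bput_getElem?]
  by_cases h : j < n
  · simp [h, List.getElem?_replicate, List.getElem?_range]
  · simp [h, List.getElem?_eq_none, foldl_bput_length, List.length_replicate,
      Nat.le_of_not_lt, List.getElem?_replicate]

theorem bucket_spec_nocond {α : Type} (idx : α → Nat) (val : α → Char) (ps : List α) (n : Nat) :
    ps.foldl (fun bs p => bput bs (idx p) (val p)) (List.replicate n [])
      = (List.range n).map (fun j => ps.filterMap (fun p => if idx p = j then some (val p) else none)) := by
  have h := bucket_spec (fun _ => True) idx val ps n
  simpa using h

theorem foldl_flatMap_map {σ α β : Type} (l1 : List α) (l2 : List β)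
    (F : σ → α × β → σ) (init : σ) :
    l1.foldl (fun st a => l2.foldl (fun st b => F st (a, b)) st) init
      = (l1.flatMap (fun a => l2.map (fun b => (a, b)))).foldl F init := by
  induction l1 generalizing init with
  | nil => rfl
  | cons a l1 ih => simp [List.foldl_append, List.foldl_map, ih]

theorem foldl_prod3 {α A B G : Type} (f : A → α → A) (g : B → α → B) (h : G → α → G)
    (l : List α) (a : A) (b : B) (c : G) :
    l.foldl (fun s p => (f s.1 p, g s.2.1 p, h s.2.2 p)) (a, b, c)
      = (l.foldl f a, l.foldl g b, l.foldl h c) := by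
  induction l generalizing a b c with
  | nil => rfl
  | cons p l ih => simp [ih]

def cells (R C : Nat) : List (Nat × Nat) :=
  (List.range R).flatMap (fun r => (List.range C).map (fun c => (r, c)))

theorem filterMap_cells {β : Type} (R C : Nat) (f : Nat × Nat → Option β) :
    (cells R C).filterMap f
      = (List.range R).flatMap (fun r => (List.range C).filterMap (fun c => f (r, c))) := by
  unfold cells
  induction (List.range R) with
  | nil => rfl
  | cons r l ih => simp only [List.flatMap_cons, List.filterMap_append, ih, List.filterMap_map]; rfl

theorem range_filterMap_eq_single {β : Type} (n k : Nat) (f : Nat → β)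
    (P : Nat → Prop) [DecidablePred P] (hP : ∀ c, P c ↔ c = k) :
    (List.range n).filterMap (fun c => if P c then some (f c) else none)
      = if k < n then [f k] else [] := by
  induction n with
  | zero => simp
  | succ m ih =>
    rw [List.range_succ, List.filterMap_append, ih]
    by_cases hk : k < m
    · have : ¬ P m := by rw [hP]; omega
      simp [this, hk, show k < m + 1 by omega]
    · by_cases hk2 : k = m
      · have : P m := by rw [hP]; omega
        simp [this, hk, hk2]
      · have : ¬ P m := by rw [hP]; omega
        simp [this, hk, show ¬ k < m + 1 by omega]

theorem range_filterMap_eq_nil {β : Type} (n : Nat) (f : Nat → Option β)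
    (hP : ∀ c, f c = none) :
    (List.range n).filterMap f = [] := by
  simp [List.filterMap_eq_nil_iff, hP]

theorem flatMap_if_singleton {β : Type} (l : List Nat) (P : Nat → Prop) [DecidablePred P]
    (g : Nat → β) :
    l.flatMap (fun r => if P r then [g r] else [])
      = (l.filter (fun r => decide (P r))).map g := by
  induction l with
  | nil => rfl
  | cons r l ih =>
    by_cases h : P r <;> simp [h, ih]

theorem flatMap_singleton_eq_map {β : Type} (l : List Nat) (g : Nat → β) :
    l.flatMap (fun r => [g r]) = l.map g := by
  induction l with
  | nil => rfl
  | cons r l ih => simp [ih]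

theorem cols_j (rows : List (List Char)) (R C j : Nat) (hj : j < C) :
    (cells R C).filterMap (fun p => if p.2 = j then some ((rows.getD p.1 []).getD p.2 ' ') else none)
      = (List.range R).map (fun row => (rows.getD row []).getD j ' ') := by
  rw [filterMap_cells]
  have inner : ∀ r : Nat,
      (List.range C).filterMap (fun c => if c = j then some ((rows.getD r []).getD c ' ') else none)
        = [(rows.getD r []).getD j ' '] := by
    intro r
    rw [range_filterMap_eq_single C j _ (fun c => c = j) (fun c => Iff.rfl)]
    simp [hj]
  simp only [inner]
  exact flatMap_singleton_eq_map _ _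

theorem d1_j (rows : List (List Char)) (R C j : Nat) :
    (cells R C).filterMap (fun p => if p.1 + p.2 = j then some ((rows.getD p.1 []).getD p.2 ' ') else none)
      = ((List.range R).filter (fun (row : Nat) =>
          decide (0 ≤ (j : Int) - (row : Int) ∧ (j : Int) - (row : Int) < (C : Int)))).map
          (fun row => (rows.getD row []).getD ((j : Int) - (row : Int)).toNat ' ') := by
  rw [filterMap_cells]
  have inner : ∀ r : Nat,
      (List.range C).filterMap (fun c => if r + c = j then some ((rows.getD r []).getD c ' ') else none)
        = if r ≤ j ∧ j - r < C then [(rows.getD r []).getD (j - r) ' '] else [] := by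
    intro r
    by_cases hr : r ≤ j
    · rw [range_filterMap_eq_single C (j - r) _ (fun c => r + c = j) (by intro c; omega)]
      by_cases h2 : j - r < C
      · simp [h2, hr]
      · simp [h2, hr]
    · rw [range_filterMap_eq_nil]
      · simp [hr]
      · intro c
        rw [if_neg]
        omega
  simp only [inner]
  rw [flatMap_if_singleton (List.range R) (fun r => r ≤ j ∧ j - r < C)]
  have hfilter : (List.range R).filter (fun r => decide (r ≤ j ∧ j - r < C))
      = (List.range R).filter (fun (row : Nat) =>
          decide (0 ≤ (j : Int) - (row : Int) ∧ (j : Int) - (row : Int) < (C : Int))) := by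
    apply List.filter_congr
    intro r _
    simp only [decide_eq_decide]
    omega
  rw [hfilter]
  apply List.map_congr_left
  intro r hr
  have hrj : 0 ≤ (j : Int) - (r : Int) := by
    have := List.of_mem_filter hr
    simp only [decide_eq_true_eq] at this
    exact this.1
  congr 1
  omega

theorem d2_j (rows : List (List Char)) (R C j : Nat) (hj : j < R + C - 1) :
    (cells R C).filterMap (fun p =>
        if (0 ≤ (p.2 : Int) + (C : Int) - 1 - (p.1 : Int) ∧
              (p.2 : Int) + (C : Int) - 1 - (p.1 : Int) < ((R + C - 1 : Nat) : Int)) ∧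
            ((p.2 : Int) + (C : Int) - 1 - (p.1 : Int)).toNat = j then
          some ((rows.getD p.1 []).getD p.2 ' ') else none)
      = ((List.range R).filter (fun (row : Nat) =>
          decide (0 ≤ (j : Int) - ((C : Int) - 1 - (row : Int)) ∧
                  (j : Int) - ((C : Int) - 1 - (row : Int)) < (C : Int)))).map
          (fun row => (rows.getD row []).getD ((j : Int) - ((C : Int) - 1 - (row : Int))).toNat ' ') := by
  rw [filterMap_cells]
  have inner : ∀ r : Nat,
      (List.range C).filterMap (fun (c : Nat) =>
        if (0 ≤ (c : Int) + (C : Int) - 1 - (r : Int) ∧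
              (c : Int) + (C : Int) - 1 - (r : Int) < ((R + C - 1 : Nat) : Int)) ∧
            ((c : Int) + (C : Int) - 1 - (r : Int)).toNat = j then
          some ((rows.getD r []).getD c ' ') else none)
        = if 0 ≤ (j : Int) - ((C : Int) - 1 - (r : Int)) ∧
              (j : Int) - ((C : Int) - 1 - (r : Int)) < (C : Int) then
            [(rows.getD r []).getD ((j : Int) - ((C : Int) - 1 - (r : Int))).toNat ' ']
          else [] := by
    intro r
    by_cases ht : 0 ≤ (j : Int) - ((C : Int) - 1 - (r : Int))
    · rw [range_filterMap_eq_single C ((j : Int) - ((C : Int) - 1 - (r : Int))).toNat _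
        (fun (c : Nat) => (0 ≤ (c : Int) + (C : Int) - 1 - (r : Int) ∧
              (c : Int) + (C : Int) - 1 - (r : Int) < ((R + C - 1 : Nat) : Int)) ∧
            ((c : Int) + (C : Int) - 1 - (r : Int)).toNat = j) (by intro c; omega)]
      by_cases h2 : (j : Int) - ((C : Int) - 1 - (r : Int)) < (C : Int)
      · rw [if_pos (by omega), if_pos ⟨ht, h2⟩]
      · rw [if_neg (by omega), if_neg (by omega)]
    · rw [range_filterMap_eq_nil, if_neg (by omega)]
      intro c
      rw [if_neg]
      omega
  simp only [inner]
  rw [flatMap_if_singleton (List.range R)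
    (fun r => 0 ≤ (j : Int) - ((C : Int) - 1 - (r : Int)) ∧
              (j : Int) - ((C : Int) - 1 - (r : Int)) < (C : Int))]

theorem st_eq (rows : List (List Char)) (R C n : Nat) :
    (List.range R).foldl (fun st r =>
      (List.range C).foldl (fun st c =>
        (bput st.1 c ((rows.getD r []).getD c ' '),
         bput st.2.1 (r + c) ((rows.getD r []).getD c ' '),
         if 0 ≤ (c : Int) + (C : Int) - 1 - (r : Int) ∧
              (c : Int) + (C : Int) - 1 - (r : Int) < (n : Int) then
           bput st.2.2 ((c : Int) + (C : Int) - 1 - (r : Int)).toNat ((rows.getD r []).getD c ' ')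
         else st.2.2)) st)
      ((List.replicate C ([] : List Char)), (List.replicate n ([] : List Char)),
       (List.replicate n ([] : List Char)))
    = ((List.range C).map (fun j => (cells R C).filterMap (fun p =>
          if p.2 = j then some ((rows.getD p.1 []).getD p.2 ' ') else none)),
       (List.range n).map (fun j => (cells R C).filterMap (fun p =>
          if p.1 + p.2 = j then some ((rows.getD p.1 []).getD p.2 ' ') else none)),
       (List.range n).map (fun j => (cells R C).filterMap (fun p =>
          if (0 ≤ (p.2 : Int) + (C : Int) - 1 - (p.1 : Int) ∧
                (p.2 : Int) + (C : Int) - 1 - (p.1 : Int) < (n : Int)) ∧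
              ((p.2 : Int) + (C : Int) - 1 - (p.1 : Int)).toNat = j then
            some ((rows.getD p.1 []).getD p.2 ' ') else none))) := by
  rw [foldl_flatMap_map (F := fun st (p : Nat × Nat) =>
        (bput st.1 p.2 ((rows.getD p.1 []).getD p.2 ' '),
         bput st.2.1 (p.1 + p.2) ((rows.getD p.1 []).getD p.2 ' '),
         if 0 ≤ (p.2 : Int) + (C : Int) - 1 - (p.1 : Int) ∧
              (p.2 : Int) + (C : Int) - 1 - (p.1 : Int) < (n : Int) then
           bput st.2.2 ((p.2 : Int) + (C : Int) - 1 - (p.1 : Int)).toNat ((rows.getD p.1 []).getD p.2 ' ')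
         else st.2.2))]
  rw [foldl_prod3
    (f := fun s (p : Nat × Nat) => bput s p.2 ((rows.getD p.1 []).getD p.2 ' '))
    (g := fun s (p : Nat × Nat) => bput s (p.1 + p.2) ((rows.getD p.1 []).getD p.2 ' '))
    (h := fun s (p : Nat × Nat) =>
        if 0 ≤ (p.2 : Int) + (C : Int) - 1 - (p.1 : Int) ∧
              (p.2 : Int) + (C : Int) - 1 - (p.1 : Int) < (n : Int) then
           bput s ((p.2 : Int) + (C : Int) - 1 - (p.1 : Int)).toNat ((rows.getD p.1 []).getD p.2 ' ')
        else s)]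
  rw [bucket_spec_nocond (fun p : Nat × Nat => p.2)
      (fun p : Nat × Nat => (rows.getD p.1 []).getD p.2 ' ')]
  rw [bucket_spec_nocond (fun p : Nat × Nat => p.1 + p.2)
      (fun p : Nat × Nat => (rows.getD p.1 []).getD p.2 ' ')]
  rw [bucket_spec (fun p : Nat × Nat =>
        0 ≤ (p.2 : Int) + (C : Int) - 1 - (p.1 : Int) ∧
            (p.2 : Int) + (C : Int) - 1 - (p.1 : Int) < (n : Int))
      (fun p : Nat × Nat => ((p.2 : Int) + (C : Int) - 1 - (p.1 : Int)).toNat)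
      (fun p : Nat × Nat => (rows.getD p.1 []).getD p.2 ' ')]
  rfl

-- ===== VERDICT (by name: the statement is the Claim_ definition above) =====
theorem matrix_elements_spec : Claim_equal_matrix_elements := by
  intro matrix _ _
  unfold Spec_matrix_elements
  simp only [matrix_elements, matrix_elements_alt]
  rw [st_eq]
  rw [List.map_map, List.map_map, List.map_map]
  have hc : (List.range ((matrix.map String.toList).headD []).length).map
      ((fun b => String.mk b) ∘ fun j => (cells (matrix.map String.toList).length ((matrix.map String.toList).headD []).length).filterMap (fun p =>
          if p.2 = j then some (((matrix.map String.toList).getD p.1 []).getD p.2 ' ') else none))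
      = (List.range ((matrix.map String.toList).headD []).length).map (fun col =>
          String.mk ((List.range (matrix.map String.toList).length).map
            (fun row => (((matrix.map String.toList)).getD row []).getD col ' '))) := by
    apply List.map_congr_left
    intro j hj
    simp only [Function.comp]
    exact congrArg String.mk (cols_j _ _ _ _ (List.mem_range.mp hj))
  have hd1 : (List.range ((matrix.map String.toList).length + ((matrix.map String.toList).headD []).length - 1)).map
      ((fun b => String.mk b) ∘ fun j => (cells (matrix.map String.toList).length ((matrix.map String.toList).headD []).length).filterMap (fun p =>
          if p.1 + p.2 = j then some (((matrix.map String.toList).getD p.1 []).getD p.2 ' ') else none))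
      = (List.range ((matrix.map String.toList).length + ((matrix.map String.toList).headD []).length - 1)).map (fun (diag : Nat) =>
          String.mk (((List.range (matrix.map String.toList).length).filter (fun (row : Nat) =>
              decide (0 ≤ (diag : Int) - (row : Int) ∧ (diag : Int) - (row : Int) < (((matrix.map String.toList).headD []).length : Int)))).map
            (fun row => ((matrix.map String.toList).getD row []).getD ((diag : Int) - (row : Int)).toNat ' '))) := by
    apply List.map_congr_left
    intro j _
    simp only [Function.comp]
    exact congrArg String.mk (d1_j _ _ _ _)
  have hd2 : (List.range ((matrix.map String.toList).length + ((matrix.map String.toList).headD []).length - 1)).map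
      ((fun b => String.mk b) ∘ fun j => (cells (matrix.map String.toList).length ((matrix.map String.toList).headD []).length).filterMap (fun p =>
          if (0 ≤ (p.2 : Int) + (((matrix.map String.toList).headD []).length : Int) - 1 - (p.1 : Int) ∧
                (p.2 : Int) + (((matrix.map String.toList).headD []).length : Int) - 1 - (p.1 : Int) < (((matrix.map String.toList).length + ((matrix.map String.toList).headD []).length - 1 : Nat) : Int)) ∧
              ((p.2 : Int) + (((matrix.map String.toList).headD []).length : Int) - 1 - (p.1 : Int)).toNat = j then
            some (((matrix.map String.toList).getD p.1 []).getD p.2 ' ') else none))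
      = (List.range ((matrix.map String.toList).length + ((matrix.map String.toList).headD []).length - 1)).map (fun (diag : Nat) =>
          String.mk (((List.range (matrix.map String.toList).length).filter (fun (row : Nat) =>
              decide (0 ≤ (diag : Int) - ((((matrix.map String.toList).headD []).length : Int) - 1 - (row : Int)) ∧
                      (diag : Int) - ((((matrix.map String.toList).headD []).length : Int) - 1 - (row : Int)) < (((matrix.map String.toList).headD []).length : Int)))).map
            (fun row => ((matrix.map String.toList).getD row []).getD ((diag : Int) - ((((matrix.map String.toList).headD []).length : Int) - 1 - (row : Int))).toNat ' '))) := by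
    apply List.map_congr_left
    intro j hj
    simp only [Function.comp]
    exact congrArg String.mk (d2_j _ _ _ _ (List.mem_range.mp hj))
  rw [hc, hd1, hd2]
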